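-- pv_equiv track=rewrite | github.com/natitedros/Competitive-Programming | Daily Questions/1048LongestStringChain.py | differByOne
-- ===== SOURCE A (Python) =====
-- def differByOne(word1, word2):
--     ptr1, ptr2 = 0, 0
--     turn = 1
--     while ptr1 < len(word1) and ptr2 < len(word2) and turn >= 0:
--         if word1[ptr1] != word2[ptr2]:
--             turn -= 1
--             ptr1 -= 1
--         ptr1 += 1
--         ptr2 += 1
--     return turn >= 0
-- ===== SOURCE B (Python) =====
-- def differByOne(word1, word2):
--     n = min(len(word1), len(word2))
--     i = 0
--     while i < n and word1[i] == word2[i]: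
--         i += 1
--     if i == n:
--         return True
--     return all(x == y for x, y in zip(word1[i:], word2[i + 1:]))
-- ===== Notes on version B (the rewrite author's own statement) =====
-- stated objective: alternative
-- what changed: Replaces A's single fused two-pointer loop with a mutable 'turn' budget and ptr1-realignment by a two-phase decomposition: first find the length of the common prefix, then compare the shifted suffixes word1[i:] vs word2[i+1:] with a zip/all pass.
import Mathlib
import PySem

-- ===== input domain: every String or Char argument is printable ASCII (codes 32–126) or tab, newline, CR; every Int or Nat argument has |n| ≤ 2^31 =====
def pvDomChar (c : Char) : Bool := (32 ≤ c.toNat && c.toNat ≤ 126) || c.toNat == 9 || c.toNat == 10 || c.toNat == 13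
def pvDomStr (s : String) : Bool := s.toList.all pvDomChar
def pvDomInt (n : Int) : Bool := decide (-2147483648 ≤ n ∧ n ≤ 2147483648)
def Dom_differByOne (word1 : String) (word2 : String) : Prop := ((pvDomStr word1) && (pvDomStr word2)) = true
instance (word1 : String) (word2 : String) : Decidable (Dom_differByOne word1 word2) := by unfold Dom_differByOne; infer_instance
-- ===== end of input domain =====

-- B replaces A's fused two-pointer loop with a turn budget by a find-common-prefix pass
-- followed by a shifted-suffix zip comparison (same asymptotic cost; a timing run measured B faster by a constant factor).

-- ===== PORT A =====
-- A's while loop: on mismatch ptr1 is decremented then re-incremented (so word1's pointer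
-- stays put) while ptr2 advances and the turn budget drops; modelled as structural
-- recursion on the two remaining suffixes with the same turn state.
def pvGoA : List Char → List Char → Int → Int
  | x :: xs, y :: ys, t =>
      if t ≥ 0 then
        if x ≠ y then pvGoA (x :: xs) ys (t - 1)
        else pvGoA xs ys t
      else t
  | _, _, t => t

def differByOne (word1 : String) (word2 : String) : Bool :=
  decide (pvGoA word1.toList word2.toList 1 ≥ 0)

-- ===== PORT B =====
-- Source B's first while loop: length of the common prefix (i)
def pvPrefixLen : List Char → List Char → Nat
  | x :: xs, y :: ys => if x = y then pvPrefixLen xs ys + 1 else 0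
  | _, _ => 0

-- Source B's all(x == y for x, y in zip(...)): pointwise equality over the overlap
def pvZipAll : List Char → List Char → Bool
  | x :: xs, y :: ys => x = y && pvZipAll xs ys
  | _, _ => true

def differByOne_alt (word1 : String) (word2 : String) : Bool :=
  let l1 := word1.toList
  let l2 := word2.toList
  let i := pvPrefixLen l1 l2
  if i = min l1.length l2.length then true
  else pvZipAll (l1.drop i) (l2.drop (i + 1))

-- ===== PRECONDITION & SPEC =====
def Spec_differByOne (word1 : String) (word2 : String) (out : Bool) : Prop := out = differByOne_alt word1 word2
instance (word1 : String) (word2 : String) (out : Bool) : Decidable (Spec_differByOne word1 word2 out) := by unfold Spec_differByOne; infer_instance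

-- ===== CLAIM (what is proved, stated in full; the proofs are below) =====
def Claim_equal_differByOne : Prop := ∀ (word1 : String) (word2 : String), Dom_differByOne word1 word2 → Spec_differByOne word1 word2 (differByOne word1 word2)

-- ===== LEMMAS AND PROOFS =====

-- with a budget of 0, A's loop returns 0 iff the overlap matches pointwise
theorem pvGoA_zero (l2 l1 : List Char) :
    pvGoA l1 l2 0 = if pvZipAll l1 l2 then 0 else -1 := by
  induction l2 generalizing l1 with
  | nil => cases l1 <;> simp [pvGoA, pvZipAll]
  | cons y ys ih =>
    cases l1 with
    | nil => simp [pvGoA, pvZipAll]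
    | cons x xs =>
      by_cases h : x = y
      · simp [pvGoA, pvZipAll, h, ih]
      · simp [pvGoA, pvZipAll, h]
        cases ys <;> simp [pvGoA]

theorem pvGoA_one (l2 l1 : List Char) :
    decide (pvGoA l1 l2 1 ≥ 0)
      = (if pvPrefixLen l1 l2 = min l1.length l2.length then true
         else pvZipAll (l1.drop (pvPrefixLen l1 l2)) (l2.drop (pvPrefixLen l1 l2 + 1))) := by
  induction l2 generalizing l1 with
  | nil => cases l1 <;> simp [pvGoA, pvPrefixLen]
  | cons y ys ih =>
    cases l1 with
    | nil => simp [pvGoA, pvPrefixLen]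
    | cons x xs =>
      by_cases h : x = y
      · simpa [pvGoA, pvPrefixLen, h, Nat.succ_min_succ] using ih xs
      · simp [pvGoA, pvPrefixLen, h, pvGoA_zero]
        split <;> simp_all [Nat.min_def]

-- ===== VERDICT (by name: the statement is the Claim_ definition above) =====
theorem differByOne_spec : Claim_equal_differByOne := by
  intro w1 w2 _
  unfold Spec_differByOne differByOne differByOne_alt
  simpa using pvGoA_one w2.toList w1.toList
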